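-- pv_equiv track=rewrite | github.com/CakeOfPeace/AI-VOICE | fish_tts_provider.py | _split_leading_tags
-- ===== SOURCE A (Python) =====
-- def _split_leading_tags(text: str) -> tuple[list[str], str]:
--     # Collect a contiguous run of leading tags like "(sincere)(soft tone)Text..."
--     tags: list[str] = []
--     i = 0
--     while i < len(text) and text[i] == "(":
--         close = text.find(")", i + 1)
--         if close == -1:
--             break
--         tag = text[i + 1:close].strip()
--         tags.append(tag)
--         i = close + 1
--     return tags, text[i:]
-- ===== SOURCE B (Python) =====
-- def _split_leading_tags(text: str) -> tuple[list[str], str]: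
--     # Split once on ")" and consume leading "("-parts, instead of scanning with find().
--     parts = text.split(")")
--     tags: list[str] = []
--     while len(parts) > 1 and parts[0].startswith("("):
--         head = parts.pop(0)
--         tags.append(head[1:].strip())
--     return tags, ")".join(parts)
-- ===== Notes on version B (the rewrite author's own statement) =====
-- stated objective: alternative
-- what changed: Replaces the index-based while loop with repeated text.find(')') by a single split on ')' followed by consuming leading '('-prefixed parts and re-joining the remainder.
import Mathlib
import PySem

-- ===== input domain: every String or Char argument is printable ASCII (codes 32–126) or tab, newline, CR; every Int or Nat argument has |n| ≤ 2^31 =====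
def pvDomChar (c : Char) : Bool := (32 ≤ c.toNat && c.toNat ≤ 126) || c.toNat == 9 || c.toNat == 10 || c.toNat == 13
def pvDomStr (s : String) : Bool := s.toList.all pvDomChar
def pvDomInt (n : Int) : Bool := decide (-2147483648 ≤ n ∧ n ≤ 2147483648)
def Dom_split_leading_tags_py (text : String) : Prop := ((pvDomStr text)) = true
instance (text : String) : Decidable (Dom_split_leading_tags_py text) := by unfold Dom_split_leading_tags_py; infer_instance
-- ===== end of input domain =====

-- B replaces A's index-based find(')') loop by one split on ')' plus a consume-and-rejoin pass (alternative decomposition, same cost).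

-- ===== PORT A =====
-- A's while loop over index i (a nonnegative int in Python, carried as Nat), with tags accumulator;
-- text[i] after the bound check is cs[i], text.find(")", i+1) is Chars.findFrom, text[i+1:close] is Chars.slice.
def splitLeadingTagsGoA (cs : List Char) (tags : List String) (i : Nat) :
    List String × String :=
  if h : i < cs.length then
    if cs[i] = '(' then
      let close := PySem.Chars.findFrom cs [')'] ((i : Int) + 1) none
      if hc : close = -1 then (tags, String.ofList (cs.drop i))
      else
        let tag := PySem.Chars.strip (PySem.Chars.slice cs (some ((i : Int) + 1)) (some close))
        splitLeadingTagsGoA cs (tags ++ [String.ofList tag]) (close.toNat + 1)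
    else (tags, String.ofList (cs.drop i))
  else (tags, String.ofList (cs.drop i))
  termination_by cs.length - i
  decreasing_by
    have hspec := PySem.Chars.findFrom_natCast_spec cs [')'] (i + 1) (by omega)
      (by push_cast; exact hc)
    push_cast at hspec
    omega

def split_leading_tags_py (text : String) : List String × String :=
  splitLeadingTagsGoA text.toList [] 0

-- ===== PORT B =====
-- B's while loop: while len(parts) > 1 and parts[0].startswith("("), pop the head and append head[1:].strip().
def splitLeadingTagsGoB (parts : List (List Char)) (tags : List String) : List String × String :=
  match parts with
  | p :: q :: rest =>
    if PySem.Chars.startswith p ['('] then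
      splitLeadingTagsGoB (q :: rest)
        (tags ++ [String.ofList (PySem.Chars.strip (PySem.Chars.slice p (some 1) none))])
    else (tags, String.ofList (PySem.Chars.join [')'] (p :: q :: rest)))
  | ps => (tags, String.ofList (PySem.Chars.join [')'] ps))

def split_leading_tags_py_alt (text : String) : List String × String :=
  splitLeadingTagsGoB (PySem.Chars.splitOn text.toList [')']) []

-- ===== PRECONDITION & SPEC =====
def Spec_split_leading_tags_py (text : String) (out : List String × String) : Prop := out = split_leading_tags_py_alt text
instance (text : String) (out : List String × String) : Decidable (Spec_split_leading_tags_py text out) := by unfold Spec_split_leading_tags_py; infer_instance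

-- ===== CLAIM (what is proved, stated in full; the proofs are below) =====
def Claim_equal_split_leading_tags_py : Prop := ∀ (text : String), Dom_split_leading_tags_py text → Spec_split_leading_tags_py text (split_leading_tags_py text)

-- ===== LEMMAS AND PROOFS =====

-- reference splitter: sp s = s.split(")") as a plain structural recursion
def spRef (s : List Char) : List (List Char) :=
  match s with
  | [] => [[]]
  | c :: t => if c = ')' then [] :: spRef t else (spRef t).modifyHead (c :: ·)

theorem spRef_ne_nil (s : List Char) : spRef s ≠ [] := by
  induction s with
  | nil => simp [spRef]
  | cons c t ih =>
    simp only [spRef]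
    split_ifs
    · simp
    · cases h : spRef t with
      | nil => exact absurd h ih
      | cons a r => simp [List.modifyHead]

theorem join_spRef (s : List Char) : PySem.Chars.join [')'] (spRef s) = s := by
  induction s with
  | nil => rw [spRef, PySem.Chars.join_singleton]
  | cons c t ih =>
    cases hs : spRef t with
    | nil => exact absurd hs (spRef_ne_nil t)
    | cons a r =>
      rw [hs] at ih
      by_cases hc : c = ')'
      · subst hc
        simp [spRef, hs, PySem.Chars.join_cons_cons, ih]
      · simp only [spRef, if_neg hc, hs, List.modifyHead]
        cases r with
        | nil =>
          rw [PySem.Chars.join_singleton] at ih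
          rw [PySem.Chars.join_singleton, ih]
        | cons b r' =>
          rw [PySem.Chars.join_cons_cons] at ih
          rw [PySem.Chars.join_cons_cons, List.cons_append, List.cons_append, ih]

theorem spRef_no_sep (s : List Char) (h : ')' ∉ s) : spRef s = [s] := by
  induction s with
  | nil => simp [spRef]
  | cons c t ih =>
    simp only [spRef]
    have hc : c ≠ ')' := by intro hc; exact h (by simp [hc])
    rw [if_neg hc, ih (by intro hm; exact h (by simp [hm]))]
    simp [List.modifyHead]

theorem spRef_append (s₁ s₂ : List Char) (h : ')' ∉ s₁) :
    spRef (s₁ ++ ')' :: s₂) = s₁ :: spRef s₂ := by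
  induction s₁ with
  | nil => simp [spRef]
  | cons c t ih =>
    have hc : c ≠ ')' := by intro hc; exact h (by simp [hc])
    simp only [List.cons_append, spRef]
    rw [if_neg hc, ih (by intro hm; exact h (by simp [hm]))]
    simp [List.modifyHead]

-- splitOn.go with single-char sep, characterized by spRef
theorem splitOn_go_eq (fuel : Nat) :
    ∀ (l cur : List Char) (accs : List (List Char)), l.length < fuel →
      PySem.Chars.splitOn.go [')'] fuel l cur accs =
        accs.reverse ++ (spRef l).modifyHead (cur.reverse ++ ·) := by
  induction fuel with
  | zero => intro l cur accs h; omega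
  | succ fuel ih =>
    intro l cur accs h
    cases l with
    | nil => simp [PySem.Chars.splitOn.go, spRef, List.modifyHead]
    | cons c rest =>
      by_cases hc : c = ')'
      · subst hc
        rw [show PySem.Chars.splitOn.go [')'] (fuel + 1) (')' :: rest) cur accs =
              PySem.Chars.splitOn.go [')'] fuel rest [] (cur.reverse :: accs) by
            simp [PySem.Chars.splitOn.go]]
        rw [ih rest [] (cur.reverse :: accs) (by simp at h; omega)]
        simp only [spRef, List.reverse_cons, List.reverse_nil, List.nil_append,
          List.modifyHead, List.append_assoc]
        cases spRef rest <;> simp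
      · rw [show PySem.Chars.splitOn.go [')'] (fuel + 1) (c :: rest) cur accs =
              PySem.Chars.splitOn.go [')'] fuel rest (c :: cur) accs by
            simp [PySem.Chars.splitOn.go, List.isPrefixOf, Ne.symm hc]]
        rw [ih rest (c :: cur) accs (by simp at h; omega)]
        simp only [spRef, if_neg hc, List.modifyHead_modifyHead]
        cases hs : spRef rest with
        | nil => exact absurd hs (spRef_ne_nil rest)
        | cons a r => simp [List.modifyHead]

theorem splitOn_eq_spRef (s : List Char) :
    PySem.Chars.splitOn s [')'] = spRef s := by
  rw [PySem.Chars.splitOn, splitOn_go_eq (s.length + 1) s [] [] (by omega)]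
  cases hs : spRef s with
  | nil => exact absurd hs (spRef_ne_nil s)
  | cons a r => simp [List.modifyHead]

-- singleton-prefix reading used to decode find's spec
theorem singleton_prefix_iff (l : List Char) (x : Char) : [x] <+: l ↔ ∃ t, l = x :: t := by
  constructor
  · rintro ⟨t, rfl⟩; exact ⟨t, rfl⟩
  · rintro ⟨t, rfl⟩; exact ⟨t, rfl⟩

-- B's loop returns (tags, join parts) whenever the head part does not start with '('
theorem goB_stop (p : List Char) (r : List (List Char)) (tags : List String)
    (hh : PySem.Chars.startswith p ['('] = false) :
    splitLeadingTagsGoB (p :: r) tags = (tags, String.ofList (PySem.Chars.join [')'] (p :: r))) := by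
  cases r with
  | nil => rfl
  | cons q rest => rw [splitLeadingTagsGoB, if_neg (by simp [hh])]

-- main loop correspondence, by strong induction on the remaining length
theorem goA_eq_goB_aux (cs : List Char) : ∀ (n i : Nat), cs.length - i ≤ n → i ≤ cs.length →
    ∀ (tags : List String),
    splitLeadingTagsGoA cs tags i = splitLeadingTagsGoB (spRef (cs.drop i)) tags := by
  intro n
  induction n with
  | zero =>
    intro i hn hi tags
    have hii : i = cs.length := by omega
    rw [splitLeadingTagsGoA, dif_neg (by omega)]
    rw [List.drop_of_length_le (by omega)]
    simp [spRef, splitLeadingTagsGoB, PySem.Chars.join_singleton]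
  | succ n ih =>
    intro i hn hi tags
    rw [splitLeadingTagsGoA]
    by_cases h : i < cs.length
    · rw [dif_pos h]
      have hdrop : cs.drop i = cs[i] :: cs.drop (i + 1) := List.drop_eq_getElem_cons h
      by_cases hpar : cs[i] = '('
      · rw [if_pos hpar]
        by_cases hc : PySem.Chars.findFrom cs [')'] ((i : Int) + 1) none = -1
        · rw [dif_pos hc]
          -- no ')' after position i: the tail splits into a single part
          have hni : ¬ ([')'] : List Char) <:+: cs.drop (i + 1) := by
            rw [← PySem.Chars.findFrom_natCast_eq_neg_one_iff cs [')'] (i + 1) (by omega)]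
            push_cast
            exact hc
          have hnm : ')' ∉ cs.drop (i + 1) := by
            intro hm
            obtain ⟨s, t, hst⟩ := List.append_of_mem hm
            exact hni ⟨s, t, by rw [hst]; simp⟩
          rw [hdrop, hpar]
          have hsp : spRef ('(' :: cs.drop (i + 1)) = ['(' :: cs.drop (i + 1)] := by
            rw [spRef, if_neg (by decide), spRef_no_sep _ hnm]
            rfl
          rw [hsp]
          simp [splitLeadingTagsGoB, PySem.Chars.join_singleton]
        · rw [dif_neg hc]
          have hspec := PySem.Chars.findFrom_natCast_spec cs [')'] (i + 1) (by omega)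
            (by push_cast; exact hc)
          push_cast at hspec
          set close := PySem.Chars.findFrom cs [')'] ((i : Int) + 1) none with hclose
          set j := close.toNat with hj
          have hij : (i : Int) + 1 ≤ close := hspec.1
          have hij' : i + 1 ≤ j := by omega
          obtain ⟨t2, ht2⟩ := (singleton_prefix_iff _ _).1 hspec.2.1
          have hjlen : j < cs.length := by
            have := congrArg List.length ht2
            simp at this
            omega
          have ht2' : t2 = cs.drop (j + 1) := by
            have := congrArg (List.drop 1) ht2
            simpa [List.drop_drop] using this.symm
          set s1 : List Char := (cs.drop (i + 1)).take (j - (i + 1)) with hs1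
          have hdecomp : cs.drop (i + 1) = s1 ++ ')' :: cs.drop (j + 1) := by
            rw [hs1]
            conv_lhs => rw [← List.take_append_drop (j - (i + 1)) (cs.drop (i + 1))]
            rw [List.drop_drop, show i + 1 + (j - (i + 1)) = j from by omega]
            rw [ht2, ht2']
          have hnm : ')' ∉ s1 := by
            intro hm
            obtain ⟨k, hk, hks⟩ := List.getElem_of_mem hm
            have hlen : s1.length ≤ j - (i + 1) := List.length_take_le _ _
            apply hspec.2.2 (i + 1 + k) (by omega) (by omega)
            rw [singleton_prefix_iff]
            refine ⟨cs.drop (i + 1 + k + 1), ?_⟩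
            simp only [hs1, List.getElem_take, List.getElem_drop] at hks
            rw [List.drop_eq_getElem_cons (by omega)]
            simp [hks]
          -- the slice text[i+1:close] is s1
          have hslice : PySem.Chars.slice cs (some ((i : Int) + 1)) (some close) = s1 := by
            have h1 : (i : Int) + 1 = ((i + 1 : Nat) : Int) := by push_cast; ring
            have h2 : close = ((j : Nat) : Int) := by omega
            rw [PySem.Chars.slice, h1, h2, PySem.List.slice_natCast]
          -- the B side consumes exactly the part '(' :: s1
          have hsp : spRef (cs.drop i) = ('(' :: s1) :: spRef (cs.drop (j + 1)) := by
            rw [hdrop, hpar, spRef, if_neg (by decide), hdecomp, spRef_append _ _ hnm]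
            rfl
          rw [hsp]
          obtain ⟨q, rest, hqr⟩ : ∃ q rest, spRef (cs.drop (j + 1)) = q :: rest := by
            cases hx : spRef (cs.drop (j + 1)) with
            | nil => exact absurd hx (spRef_ne_nil _)
            | cons q rest => exact ⟨q, rest, rfl⟩
          rw [hqr, splitLeadingTagsGoB, if_pos (by simp [PySem.Chars.startswith, List.isPrefixOf]), ← hqr]
          have hbslice : PySem.Chars.slice ('(' :: s1) (some 1) none = s1 := by
            simp only [PySem.Chars.slice]
            rw [PySem.List.slice_from _ (by omega)]
            rfl
          rw [hbslice, hslice]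
          exact ih (j + 1) (by omega) (by omega) _
      · rw [if_neg hpar]
        -- head of the remainder is not '(': B returns immediately too
        rw [hdrop]
        have : splitLeadingTagsGoB (spRef (cs[i] :: cs.drop (i + 1))) tags =
            (tags, String.ofList (PySem.Chars.join [')'] (spRef (cs[i] :: cs.drop (i + 1))))) := by
          by_cases hcp : cs[i] = ')'
          · rw [spRef, if_pos hcp]
            exact goB_stop _ _ _ (by simp [PySem.Chars.startswith, List.isPrefixOf])
          · rw [spRef, if_neg hcp]
            cases hx : spRef (cs.drop (i + 1)) with
            | nil => exact absurd hx (spRef_ne_nil _)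
            | cons a r =>
              rw [List.modifyHead]
              exact goB_stop _ _ _
                (by simp [PySem.Chars.startswith, List.isPrefixOf, Ne.symm hpar])
        rw [this, join_spRef, ← hdrop]
    · rw [dif_neg h]
      rw [List.drop_of_length_le (by omega)]
      simp [spRef, splitLeadingTagsGoB, PySem.Chars.join_singleton]

theorem goA_eq_goB (cs : List Char) : ∀ (i : Nat), i ≤ cs.length → ∀ (tags : List String),
    splitLeadingTagsGoA cs tags i = splitLeadingTagsGoB (spRef (cs.drop i)) tags :=
  fun i hi tags => goA_eq_goB_aux cs (cs.length - i) i (by omega) hi tags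

-- ===== VERDICT (by name: the statement is the Claim_ definition above) =====
theorem split_leading_tags_py_spec : Claim_equal_split_leading_tags_py := by
  intro text _
  unfold Spec_split_leading_tags_py split_leading_tags_py split_leading_tags_py_alt
  rw [goA_eq_goB text.toList 0 (by omega) [], splitOn_eq_spRef]
  rfl
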